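-- pv_equiv track=rewrite | github.com/7h3r3v3n4n7/AgentRed | lib/Agents.py | _get_target_type
-- ===== SOURCE A (Python) =====
-- def _get_target_type(target: str, context: str = "") -> str:
--     """Determine the type of target for learning purposes"""
--     target_lower = target.lower()
--
--     # Analyze target characteristics
--     if any(port in context for port in ['80', '443', '8080', '8443']):
--         return "web_server"
--     elif any(db in context for db in ['mysql', 'postgres', 'mongo', 'redis']):
--         return "database"
--     elif any(api in context for api in ['api', 'rest', 'graphql', 'soap']):
--         return "api"
--     elif any(service in context for service in ['ssh', 'ftp', 'smtp', 'pop3']):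
--         return "service"
--     else:
--         return "unknown"
-- ===== SOURCE B (Python) =====
-- # B: one position-by-position scan of context collecting every matched category,
-- # then a priority pick -- instead of A's four independent substring-test branches.
-- _KEYWORD_CATEGORY = [
--     ('80', 'web_server'), ('443', 'web_server'), ('8080', 'web_server'), ('8443', 'web_server'),
--     ('mysql', 'database'), ('postgres', 'database'), ('mongo', 'database'), ('redis', 'database'),
--     ('api', 'api'), ('rest', 'api'), ('graphql', 'api'), ('soap', 'api'),
--     ('ssh', 'service'), ('ftp', 'service'), ('smtp', 'service'), ('pop3', 'service'),
-- ]
-- _PRIORITY = ['web_server', 'database', 'api', 'service']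
--
-- def _get_target_type(target: str, context: str = "") -> str:
--     target_lower = target.lower()
--     found = set()
--     for i in range(len(context)):
--         for kw, cat in _KEYWORD_CATEGORY:
--             if context.startswith(kw, i):
--                 found.add(cat)
--     for cat in _PRIORITY:
--         if cat in found:
--             return cat
--     return "unknown"
-- ===== Notes on version B (the rewrite author's own statement) =====
-- stated objective: alternative
-- what changed: Instead of four independent first-hit substring tests, B scans the context once position by position, collecting into a set every category whose keyword starts at that position, and afterwards returns the highest-priority collected category.
import Mathlib
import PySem

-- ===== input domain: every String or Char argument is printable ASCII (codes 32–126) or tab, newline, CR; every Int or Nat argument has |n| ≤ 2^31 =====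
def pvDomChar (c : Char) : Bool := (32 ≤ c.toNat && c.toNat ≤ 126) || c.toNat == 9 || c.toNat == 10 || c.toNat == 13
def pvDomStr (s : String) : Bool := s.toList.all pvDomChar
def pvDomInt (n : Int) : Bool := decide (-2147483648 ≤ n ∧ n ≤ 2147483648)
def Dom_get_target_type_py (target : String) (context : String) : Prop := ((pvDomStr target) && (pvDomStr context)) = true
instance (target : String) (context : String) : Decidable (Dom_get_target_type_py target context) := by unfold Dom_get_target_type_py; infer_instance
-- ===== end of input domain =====

-- B scans the context position by position, collecting matched categories into a set,
-- then picks by priority; A tests each category's keywords with 'in' in a fixed cascade.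

-- ===== PORT A =====
def get_target_type_py (target : String) (context : String) : String :=
  let _target_lower := PySem.Str.lower target
  if ["80", "443", "8080", "8443"].any (fun port => PySem.Str.isIn port context) then "web_server"
  else if ["mysql", "postgres", "mongo", "redis"].any (fun db => PySem.Str.isIn db context) then "database"
  else if ["api", "rest", "graphql", "soap"].any (fun api => PySem.Str.isIn api context) then "api"
  else if ["ssh", "ftp", "smtp", "pop3"].any (fun service => PySem.Str.isIn service context) then "service"
  else "unknown"

-- ===== PORT B =====
def pvKwTable : List (String × String) :=
  [("80", "web_server"), ("443", "web_server"), ("8080", "web_server"), ("8443", "web_server"),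
   ("mysql", "database"), ("postgres", "database"), ("mongo", "database"), ("redis", "database"),
   ("api", "api"), ("rest", "api"), ("graphql", "api"), ("soap", "api"),
   ("ssh", "service"), ("ftp", "service"), ("smtp", "service"), ("pop3", "service")]

-- context.startswith(kw, i) on 0 ≤ i is exactly 'kw is a prefix of context[i:]' (PySem.Chars.startswith on drop i)
def pvCollect (ctx : List Char) : PySem.Set String :=
  (List.range ctx.length).foldl
    (fun found i =>
      pvKwTable.foldl
        (fun f p => if PySem.Chars.startswith (ctx.drop i) p.1.toList then PySem.Set.add f p.2 else f)
        found)
    PySem.Set.empty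

def pvPick : List String → PySem.Set String → String
  | [], _ => "unknown"
  | c :: rest, found => if found.contains c then c else pvPick rest found

def get_target_type_py_alt (target : String) (context : String) : String :=
  let _target_lower := PySem.Str.lower target
  pvPick ["web_server", "database", "api", "service"] (pvCollect context.toList)

-- ===== PRECONDITION & SPEC =====
def Spec_get_target_type_py (target : String) (context : String) (out : String) : Prop := out = get_target_type_py_alt target context
instance (target : String) (context : String) (out : String) : Decidable (Spec_get_target_type_py target context out) := by unfold Spec_get_target_type_py; infer_instance

-- ===== CLAIM (what is proved, stated in full; the proofs are below) =====
def Claim_equal_get_target_type_py : Prop := ∀ (target : String) (context : String), Dom_get_target_type_py target context → Spec_get_target_type_py target context (get_target_type_py target context)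

-- ===== LEMMAS AND PROOFS =====

-- membership after the inner fold over the keyword table
theorem mem_inner_fold (ctx : List Char) (i : Nat) (tbl : List (String × String))
    (f : PySem.Set String) (x : String) :
    x ∈ tbl.foldl (fun f p => if PySem.Chars.startswith (ctx.drop i) p.1.toList then PySem.Set.add f p.2 else f) f ↔
      x ∈ f ∨ ∃ p ∈ tbl, PySem.Chars.startswith (ctx.drop i) p.1.toList = true ∧ p.2 = x := by
  induction tbl generalizing f with
  | nil => simp
  | cons hd tl ih =>
    simp only [List.foldl_cons, ih, List.mem_cons]
    by_cases h : PySem.Chars.startswith (ctx.drop i) hd.1.toList = true <;>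
      simp only [h, if_true, PySem.Set.mem_add] <;>
      constructor
    · rintro ((h' | h') | ⟨p, hp, hc, he⟩)
      · exact Or.inl h'
      · exact Or.inr ⟨hd, Or.inl rfl, h, h'.symm⟩
      · exact Or.inr ⟨p, Or.inr hp, hc, he⟩
    · rintro (h' | ⟨p, hp, hc, he⟩)
      · exact Or.inl (Or.inl h')
      · rcases hp with rfl | hp'
        · exact Or.inl (Or.inr he.symm)
        · exact Or.inr ⟨p, hp', hc, he⟩
    · rintro (h' | ⟨p, hp, hc, he⟩)
      · exact Or.inl h'
      · exact Or.inr ⟨p, Or.inr hp, hc, he⟩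
    · rintro (h' | ⟨p, hp, hc, he⟩)
      · exact Or.inl h'
      · rcases hp with rfl | hp'
        · exact absurd hc h
        · exact Or.inr ⟨p, hp', hc, he⟩

theorem mem_outer_fold (ctx : List Char) (l : List Nat) (f0 : PySem.Set String) (x : String) :
    x ∈ l.foldl
        (fun found i =>
          pvKwTable.foldl
            (fun f p => if PySem.Chars.startswith (ctx.drop i) p.1.toList then PySem.Set.add f p.2 else f)
            found) f0 ↔
      x ∈ f0 ∨ ∃ i ∈ l, ∃ p ∈ pvKwTable,
        PySem.Chars.startswith (ctx.drop i) p.1.toList = true ∧ p.2 = x := by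
  induction l generalizing f0 with
  | nil => simp
  | cons hd tl ih =>
    simp only [List.foldl_cons, ih, mem_inner_fold]
    constructor
    · rintro (⟨h | ⟨p, hp, hc, he⟩⟩ | ⟨i, hi, hrest⟩)
      · exact Or.inl h
      · exact Or.inr ⟨hd, List.mem_cons_self .., p, hp, hc, he⟩
      · exact Or.inr ⟨i, List.mem_cons_of_mem _ hi, hrest⟩
    · rintro (h | ⟨i, hi, hrest⟩)
      · exact Or.inl (Or.inl h)
      · rcases List.mem_cons.1 hi with rfl | hi'
        · exact Or.inl (Or.inr hrest)
        · exact Or.inr ⟨i, hi', hrest⟩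

-- bounded position scan with a nonempty keyword finds exactly the substring occurrences
theorem exists_range_prefix_iff (kw ctx : List Char) (hk : kw ≠ []) :
    (∃ i ∈ List.range ctx.length, kw <+: ctx.drop i) ↔ PySem.Chars.isIn kw ctx = true := by
  rw [← PySem.Chars.exists_prefix_drop_iff_isIn]
  constructor
  · rintro ⟨i, _, h⟩; exact ⟨i, h⟩
  · rintro ⟨j, h⟩
    by_cases hj : j < ctx.length
    · exact ⟨j, List.mem_range.2 hj, h⟩
    · exfalso
      have : ctx.drop j = [] := List.drop_eq_nil_of_le (le_of_not_gt hj)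
      rw [this] at h
      exact hk (List.prefix_nil.1 h)

theorem mem_collect (ctx : List Char) (x : String) :
    x ∈ pvCollect ctx ↔ ∃ p ∈ pvKwTable, PySem.Chars.isIn p.1.toList ctx = true ∧ p.2 = x := by
  unfold pvCollect
  rw [mem_outer_fold]
  simp only [PySem.Set.empty, List.not_mem_nil, false_or]
  constructor
  · rintro ⟨i, hi, p, hp, hc, he⟩
    refine ⟨p, hp, ?_, he⟩
    rw [← exists_range_prefix_iff p.1.toList ctx ?hne]
    · exact ⟨i, hi, (PySem.Chars.startswith_iff _ _).1 hc⟩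
    · fin_cases hp <;> simp
  · rintro ⟨p, hp, hc, he⟩
    have hne : p.1.toList ≠ [] := by fin_cases hp <;> simp
    rcases (exists_range_prefix_iff p.1.toList ctx hne).2 hc with ⟨i, hi, hpre⟩
    exact ⟨i, hi, p, hp, (PySem.Chars.startswith_iff _ _).2 hpre, he⟩

-- one category's membership in the collected set equals A's any-over-keywords test
theorem mem_collect_iff_any (context : String) (cat : String) (kws : List String)
    (htab : ∀ p ∈ pvKwTable, p.2 = cat ↔ p.1 ∈ kws)
    (hmem : ∀ k ∈ kws, (k, cat) ∈ pvKwTable) :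
    cat ∈ pvCollect context.toList ↔
      (kws.any (fun kw => PySem.Str.isIn kw context)) = true := by
  rw [mem_collect]
  simp only [List.any_eq_true, PySem.Str.isIn_eq]
  constructor
  · rintro ⟨p, hp, hc, he⟩
    exact ⟨p.1, (htab p hp).1 he, hc⟩
  · rintro ⟨k, hk, hc⟩
    exact ⟨(k, cat), hmem k hk, hc, rfl⟩

-- ===== VERDICT (by name: the statement is the Claim_ definition above) =====
set_option maxHeartbeats 1000000 in
theorem get_target_type_py_spec : Claim_equal_get_target_type_py := by
  intro target context _
  unfold Spec_get_target_type_py get_target_type_py get_target_type_py_alt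
  have Hw := mem_collect_iff_any context "web_server" ["80", "443", "8080", "8443"]
    (by intro p hp; fin_cases hp <;> simp) (by intro k hk; fin_cases hk <;> simp [pvKwTable])
  have Hdb := mem_collect_iff_any context "database" ["mysql", "postgres", "mongo", "redis"]
    (by intro p hp; fin_cases hp <;> simp) (by intro k hk; fin_cases hk <;> simp [pvKwTable])
  have Hap := mem_collect_iff_any context "api" ["api", "rest", "graphql", "soap"]
    (by intro p hp; fin_cases hp <;> simp) (by intro k hk; fin_cases hk <;> simp [pvKwTable])
  have Hsv := mem_collect_iff_any context "service" ["ssh", "ftp", "smtp", "pop3"]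
    (by intro p hp; fin_cases hp <;> simp) (by intro k hk; fin_cases hk <;> simp [pvKwTable])
  simp only [pvPick, PySem.Set.contains, List.contains_eq_mem, decide_eq_true_eq, Hw, Hdb, Hap, Hsv]
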